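-- pv_equiv track=rewrite | github.com/ValleyC/edisco-partition | scripts/eval_cvrp_with_tsp.py | extract_routes
-- ===== SOURCE A (Python) =====
-- def extract_routes(route_sequence):
--     """Extract individual routes from a route sequence."""
--     routes = []
--     current_route = []
--
--     for node in route_sequence:
--         if node == 0:  # Depot
--             if current_route:
--                 routes.append(current_route)
--                 current_route = []
--         else:
--             current_route.append(node)
--
--     if current_route:
--         routes.append(current_route)
--
--     return routes
-- ===== SOURCE B (Python) =====
-- def extract_routes(route_sequence):
--     """Extract individual routes from a route sequence."""
--     # Phase 1: index table of depot markers.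
--     idx = [i for i, node in enumerate(route_sequence) if node == 0]
--     # Phase 2: boundary-driven slicing.
--     starts = [0] + [i + 1 for i in idx]
--     ends = idx + [len(route_sequence)]
--     routes = []
--     for a, b in zip(starts, ends):
--         seg = route_sequence[a:b]
--         if seg:
--             routes.append(seg)
--     return routes
-- ===== Notes on version B (the rewrite author's own statement) =====
-- stated objective: alternative
-- what changed: Replaces the running-accumulator loop with an index-table pass over depot positions followed by boundary-driven slicing of the original sequence.
import Mathlib
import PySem

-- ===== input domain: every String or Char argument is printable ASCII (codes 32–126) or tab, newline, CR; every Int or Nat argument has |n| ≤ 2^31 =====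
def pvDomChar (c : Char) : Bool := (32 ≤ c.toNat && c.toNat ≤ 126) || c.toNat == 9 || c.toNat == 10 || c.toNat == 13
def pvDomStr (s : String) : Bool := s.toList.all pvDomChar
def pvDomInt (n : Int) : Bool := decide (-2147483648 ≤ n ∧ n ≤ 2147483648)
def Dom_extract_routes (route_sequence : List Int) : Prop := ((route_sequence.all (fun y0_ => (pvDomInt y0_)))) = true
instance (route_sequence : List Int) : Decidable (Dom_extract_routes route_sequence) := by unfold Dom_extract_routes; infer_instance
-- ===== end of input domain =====

-- B replaces A's running-accumulator loop by an index-table pass over depot positions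
-- followed by boundary-driven slicing (alternative decomposition, same O(n) cost).

-- ===== PORT A =====
-- literal transliteration: fold over the sequence carrying (routes, current_route), final flush
def extract_routes (route_sequence : List Int) : List (List Int) :=
  let st := route_sequence.foldl
    (fun (st : List (List Int) × List Int) node =>
      if node == 0 then
        if st.2 = [] then st else (st.1 ++ [st.2], [])
      else
        (st.1, st.2 ++ [node]))
    ([], [])
  if st.2 = [] then st.1 else st.1 ++ [st.2]

-- ===== PORT B =====
-- literal transliteration of Source B: depot index table, then boundary pairs, then slices
def extract_routes_alt (route_sequence : List Int) : List (List Int) :=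
  let idx := ((PySem.List.enumerate route_sequence).filter (fun p => p.2 == 0)).map Prod.fst
  let starts := 0 :: idx.map (· + 1)
  let ends := idx ++ [(route_sequence.length : Int)]
  (starts.zip ends).foldl
    (fun routes p =>
      let seg := PySem.List.slice route_sequence (some p.1) (some p.2)
      if seg = [] then routes else routes ++ [seg])
    []

-- ===== PRECONDITION & SPEC =====
def Spec_extract_routes (route_sequence : List Int) (out : List (List Int)) : Prop := out = extract_routes_alt route_sequence
instance (route_sequence : List Int) (out : List (List Int)) : Decidable (Spec_extract_routes route_sequence out) := by unfold Spec_extract_routes; infer_instance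

-- ===== CLAIM (what is proved, stated in full; the proofs are below) =====
def Claim_equal_extract_routes : Prop := ∀ (route_sequence : List Int), Dom_extract_routes route_sequence → Spec_extract_routes route_sequence (extract_routes route_sequence)

-- ===== LEMMAS AND PROOFS =====

-- common recursive characterisation: the (possibly empty) chunks between depot markers
def pvChunks : List Int → List (List Int)
  | [] => [[]]
  | x :: xs => if x = 0 then [] :: pvChunks xs else (pvChunks xs).modifyHead (x :: ·)

-- zero positions, recursively
def pvZ : List Int → List Int
  | [] => []
  | x :: xs => if x = 0 then 0 :: (pvZ xs).map (· + 1) else (pvZ xs).map (· + 1)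

-- the unfiltered slice list B builds
def pvSegs (l : List Int) : List (List Int) :=
  ((0 :: (pvZ l).map (· + 1)).zip (pvZ l ++ [(l.length : Int)])).map
    (fun p => PySem.List.slice l (some p.1) (some p.2))

-- A's loop body and final flush, named for the induction
def pvStep (st : List (List Int) × List Int) (node : Int) : List (List Int) × List Int :=
  if node == 0 then
    if st.2 = [] then st else (st.1 ++ [st.2], [])
  else
    (st.1, st.2 ++ [node])

def pvFlush (st : List (List Int) × List Int) : List (List Int) :=
  if st.2 = [] then st.1 else st.1 ++ [st.2]

lemma extract_routes_eq_flush (l : List Int) :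
    extract_routes l = pvFlush (l.foldl pvStep ([], [])) := rfl

lemma pvZ_nonneg : ∀ (l : List Int), ∀ a ∈ pvZ l, 0 ≤ a := by
  intro l
  induction l with
  | nil => simp [pvZ]
  | cons x xs ih =>
    intro a ha
    simp only [pvZ] at ha
    split at ha
    · rcases List.mem_cons.1 ha with h | h
      · omega
      · rcases List.mem_map.1 h with ⟨b, hb, rfl⟩; have := ih b hb; omega
    · rcases List.mem_map.1 ha with ⟨b, hb, rfl⟩; have := ih b hb; omega

lemma enumerate_filter_zero (l : List Int) :
    ∀ s : Int, ((PySem.List.enumerate l s).filter (fun p => p.2 == 0)).map Prod.fst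
      = (pvZ l).map (· + s) := by
  induction l with
  | nil => intro s; simp [PySem.List.enumerate_nil, pvZ]
  | cons x xs ih =>
    intro s
    rw [PySem.List.enumerate_cons]
    by_cases hx : x = 0
    · subst hx
      rw [List.filter_cons, if_pos (by simp), List.map_cons, ih (s + 1),
          show pvZ ((0 : Int) :: xs) = 0 :: (pvZ xs).map (· + 1) from by simp [pvZ],
          List.map_cons, List.map_map]
      congr 1
      · simp
      · apply List.map_congr_left; intro a _; simp; omega
    · rw [List.filter_cons, if_neg (by simpa using hx), ih (s + 1),
          show pvZ (x :: xs) = (pvZ xs).map (· + 1) from by simp [pvZ, hx],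
          List.map_map]
      apply List.map_congr_left; intro a _; simp; omega

lemma slice_cons_shift (x : Int) (xs : List Int) (a b : Int) (ha : 0 ≤ a) (hb : 0 ≤ b) :
    PySem.List.slice (x :: xs) (some (a + 1)) (some (b + 1))
      = PySem.List.slice xs (some a) (some b) := by
  rw [PySem.List.slice_toNat _ (by omega) (by omega),
      PySem.List.slice_toNat _ ha hb,
      show (a + 1).toNat = a.toNat + 1 from by omega, List.drop_succ_cons]
  congr 1
  omega

lemma slice_cons_zero (x : Int) (xs : List Int) (b : Int) (hb : 0 ≤ b) :
    PySem.List.slice (x :: xs) (some 0) (some (b + 1))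
      = x :: PySem.List.slice xs (some 0) (some b) := by
  rw [PySem.List.slice_toNat _ (by omega) (by omega),
      PySem.List.slice_toNat _ (by omega) hb,
      show (b + 1).toNat = b.toNat + 1 from by omega]
  simp

lemma zip_map_shift (x : Int) (xs : List Int) :
    ∀ (u v : List Int), (∀ a ∈ u, 0 ≤ a) → (∀ b ∈ v, 0 ≤ b) →
    ((u.map (· + 1)).zip (v.map (· + 1))).map
        (fun p => PySem.List.slice (x :: xs) (some p.1) (some p.2))
      = (u.zip v).map (fun p => PySem.List.slice xs (some p.1) (some p.2)) := by
  intro u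
  induction u with
  | nil => intro v _ _; simp
  | cons a as ih =>
    intro v hu hv
    cases v with
    | nil => simp
    | cons b bs =>
      simp only [List.map_cons, List.zip_cons_cons]
      rw [slice_cons_shift x xs a b (hu a (by simp)) (hv b (by simp)),
          ih bs (fun c hc => hu c (by simp [hc])) (fun c hc => hv c (by simp [hc]))]

lemma mem_ends_nonneg (xs : List Int) :
    ∀ b ∈ pvZ xs ++ [(xs.length : Int)], 0 ≤ b := by
  intro b hb
  rcases List.mem_append.1 hb with h | h
  · exact pvZ_nonneg xs b h
  · simp at h; omega

lemma segs_eq_chunks : ∀ l : List Int, pvSegs l = pvChunks l := by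
  intro l
  induction l with
  | nil =>
    simp [pvSegs, pvZ, pvChunks, PySem.List.slice_toNat _ le_rfl le_rfl]
  | cons x xs ih =>
    have hstarts_nonneg : ∀ a ∈ (0 : Int) :: (pvZ xs).map (· + 1), 0 ≤ a := by
      intro a ha
      rcases List.mem_cons.1 ha with rfl | h
      · exact le_rfl
      · rcases List.mem_map.1 h with ⟨c, hc, rfl⟩
        have := pvZ_nonneg xs c hc; omega
    by_cases hx : x = 0
    · subst hx
      have hz0 : PySem.List.slice ((0 : Int) :: xs) (some 0) (some 0) = [] := by
        rw [PySem.List.slice_toNat _ le_rfl le_rfl]; simp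
      have hsnd : pvZ ((0 : Int) :: xs) ++ [(((0 : Int) :: xs).length : Int)]
          = 0 :: ((pvZ xs) ++ [(xs.length : Int)]).map (· + 1) := by
        rw [show pvZ ((0 : Int) :: xs) = 0 :: (pvZ xs).map (· + 1) from by simp [pvZ]]
        simp
      have hfst : (0 : Int) :: (pvZ ((0 : Int) :: xs)).map (· + 1)
          = 0 :: ((0 : Int) :: (pvZ xs).map (· + 1)).map (· + 1) := by
        rw [show pvZ ((0 : Int) :: xs) = 0 :: (pvZ xs).map (· + 1) from by simp [pvZ]]
      unfold pvSegs
      rw [hfst, hsnd, List.zip_cons_cons, List.map_cons]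
      simp only []
      rw [hz0,
          zip_map_shift 0 xs (0 :: (pvZ xs).map (· + 1)) ((pvZ xs) ++ [(xs.length : Int)])
            hstarts_nonneg (mem_ends_nonneg xs)]
      have hback : ((0 :: (pvZ xs).map (· + 1)).zip ((pvZ xs) ++ [(xs.length : Int)])).map
          (fun p => PySem.List.slice xs (some p.1) (some p.2)) = pvSegs xs := rfl
      rw [hback, ih]
      simp [pvChunks]
    · obtain ⟨e0, E, hE⟩ : ∃ e0 E, pvZ xs ++ [(xs.length : Int)] = e0 :: E := by
        cases h : pvZ xs ++ [(xs.length : Int)] with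
        | nil => exact absurd h (by simp)
        | cons a as => exact ⟨a, as, rfl⟩
      have he0 : 0 ≤ e0 := mem_ends_nonneg xs e0 (by rw [hE]; simp)
      have hEmem : ∀ b ∈ E, 0 ≤ b := fun b hb =>
        mem_ends_nonneg xs b (by rw [hE]; simp [hb])
      have hsnd : pvZ (x :: xs) ++ [((x :: xs).length : Int)]
          = (e0 + 1) :: E.map (· + 1) := by
        rw [show pvZ (x :: xs) = (pvZ xs).map (· + 1) from by simp [pvZ, hx],
            show ((x :: xs).length : Int) = (xs.length : Int) + 1 from by simp,
            show (pvZ xs).map (· + 1) ++ [(xs.length : Int) + 1]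
              = ((pvZ xs) ++ [(xs.length : Int)]).map (· + 1) from by simp,
            hE, List.map_cons]
      have hfst : (0 : Int) :: (pvZ (x :: xs)).map (· + 1)
          = 0 :: ((pvZ xs).map (· + 1)).map (· + 1) := by
        rw [show pvZ (x :: xs) = (pvZ xs).map (· + 1) from by simp [pvZ, hx]]
      unfold pvSegs
      rw [hfst, hsnd, List.zip_cons_cons, List.map_cons]
      simp only []
      rw [slice_cons_zero x xs e0 he0,
          zip_map_shift x xs ((pvZ xs).map (· + 1)) E
            (by intro a ha; rcases List.mem_map.1 ha with ⟨c, hc, rfl⟩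
                have := pvZ_nonneg xs c hc; omega)
            hEmem]
      have hsegs : pvSegs xs
          = PySem.List.slice xs (some 0) (some e0)
            :: (((pvZ xs).map (· + 1)).zip E).map
                (fun p => PySem.List.slice xs (some p.1) (some p.2)) := by
        unfold pvSegs
        rw [hE, List.zip_cons_cons, List.map_cons]
      rw [show pvChunks (x :: xs) = (pvChunks xs).modifyHead (x :: ·) from by
            simp [pvChunks, hx],
          ← ih, hsegs]
      rfl

lemma foldl_slice_filter (l : List Int) :
    ∀ (pairs : List (Int × Int)) (init : List (List Int)),
    pairs.foldl
      (fun routes p =>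
        let seg := PySem.List.slice l (some p.1) (some p.2)
        if seg = [] then routes else routes ++ [seg])
      init
    = init ++ (pairs.map (fun p => PySem.List.slice l (some p.1) (some p.2))).filter
        (fun s => !s.isEmpty) := by
  intro pairs
  induction pairs with
  | nil => intro init; simp
  | cons p ps ih =>
    intro init
    simp only [List.foldl_cons, List.map_cons, List.filter_cons]
    by_cases h : PySem.List.slice l (some p.1) (some p.2) = []
    · rw [if_pos h, ih, if_neg (by simp [h])]
    · rw [if_neg h, ih, if_pos (by simp [h])]
      simp

lemma modifyHead_nil_append (l : List (List Int)) :
    l.modifyHead (fun s => [] ++ s) = l := by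
  cases l with
  | nil => rfl
  | cons a as => simp

lemma a_loop : ∀ (xs : List Int) (R : List (List Int)) (cur : List Int),
    pvFlush (xs.foldl pvStep (R, cur))
      = R ++ ((pvChunks xs).modifyHead (cur ++ ·)).filter (fun s => !s.isEmpty) := by
  intro xs
  induction xs with
  | nil =>
    intro R cur
    by_cases h : cur = []
    · subst h; simp [pvFlush, pvChunks]
    · simp only [List.foldl_nil, pvFlush, pvChunks, List.modifyHead]
      rw [if_neg h, List.filter_cons, if_pos (by simp [h])]
      simp
  | cons x xs ih =>
    intro R cur
    rw [List.foldl_cons]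
    by_cases hx : x = 0
    · subst hx
      by_cases hc : cur = []
      · subst hc
        rw [show pvStep (R, []) 0 = (R, []) from by simp [pvStep], ih,
            modifyHead_nil_append,
            show pvChunks ((0 : Int) :: xs) = [] :: pvChunks xs from by simp [pvChunks]]
        simp only [List.modifyHead, List.nil_append, List.filter_cons]
        rw [if_neg (by simp)]
      · rw [show pvStep (R, cur) 0 = (R ++ [cur], []) from by simp [pvStep, hc],
            ih, modifyHead_nil_append,
            show pvChunks ((0 : Int) :: xs) = [] :: pvChunks xs from by simp [pvChunks]]
        simp only [List.modifyHead, List.append_nil, List.filter_cons]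
        rw [if_pos (by simp [hc])]
        simp
    · rw [show pvStep (R, cur) x = (R, cur ++ [x]) from by simp [pvStep, hx], ih,
          show pvChunks (x :: xs) = (pvChunks xs).modifyHead (x :: ·) from by
            simp [pvChunks, hx]]
      congr 2
      cases pvChunks xs with
      | nil => rfl
      | cons a as => simp

-- ===== VERDICT (by name: the statement is the Claim_ definition above) =====
theorem extract_routes_spec : Claim_equal_extract_routes := by
  unfold Claim_equal_extract_routes Spec_extract_routes
  intro l _
  show extract_routes l = extract_routes_alt l
  rw [extract_routes_eq_flush, a_loop l [] [], modifyHead_nil_append]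
  show _ = extract_routes_alt l
  unfold extract_routes_alt
  simp only [enumerate_filter_zero l 0]
  rw [show (pvZ l).map (· + (0 : Int)) = pvZ l from by simp, foldl_slice_filter]
  rw [show ((0 :: (pvZ l).map (· + 1)).zip ((pvZ l) ++ [(l.length : Int)])).map
        (fun p => PySem.List.slice l (some p.1) (some p.2)) = pvSegs l from rfl,
      segs_eq_chunks]
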